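-- pv_equiv track=rewrite | github.com/ArtemHelloWorld/algorithms | algorithms_training3/1/5_recursion.py | answer
-- ===== SOURCE A (Python) =====
-- def answer(letters_list: list):
--     len_letters_list = len(letters_list)
--     if len_letters_list == 0 or len_letters_list == 1:
--         return 0
--     elif len_letters_list == 2:
--         return min(letters_list) * (len_letters_list - 1)
--
--     min_letters_list = min(letters_list)
--     letters_list = [x - min_letters_list for x in letters_list]
--     l = 0
--     r = 0
--     res = min_letters_list * (len_letters_list - 1)
--     while r <= len_letters_list - 1:
--         if letters_list[r] == 0:
--             res += answer(letters_list[l:r])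
--             l = r + 1
--         r += 1
--     res += answer(letters_list[l:])
--     return res
-- ===== SOURCE B (Python) =====
-- def answer(letters_list: list):
--     total = 0
--     for x, y in zip(letters_list, letters_list[1:]):
--         total += min(x, y)
--     return total
-- ===== Notes on version B (the rewrite author's own statement) =====
-- stated objective: faster
-- what changed: Replaces the recursive divide-at-the-minimum accumulation (subtract min, split at zeros, recurse on every segment) by a single pass summing min(x,y) over adjacent pairs, which computes the same total.
import Mathlib
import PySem

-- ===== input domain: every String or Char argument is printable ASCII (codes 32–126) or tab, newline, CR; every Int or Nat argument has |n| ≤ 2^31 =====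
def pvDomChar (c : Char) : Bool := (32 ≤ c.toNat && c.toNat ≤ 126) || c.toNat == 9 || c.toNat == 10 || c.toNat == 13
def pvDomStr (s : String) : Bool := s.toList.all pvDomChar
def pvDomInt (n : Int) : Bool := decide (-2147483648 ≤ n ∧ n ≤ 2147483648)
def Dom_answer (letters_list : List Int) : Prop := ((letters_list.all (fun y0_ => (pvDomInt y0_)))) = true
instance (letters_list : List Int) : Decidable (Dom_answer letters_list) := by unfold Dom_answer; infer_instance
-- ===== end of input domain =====

-- B replaces A's recursive divide-at-the-minimum accumulation by a single pass
-- summing min(x, y) over adjacent pairs; the two compute the same total.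


-- ===== PORT A =====
-- body of A's while loop: state (l, res); at index r, if ys[r] == 0 then
-- res += answer(ys[l:r]); l = r + 1  (the recursive call is the parameter f)
def answerBody (f : List Int → Int) (ys : List Int) (st : Nat × Int) (r : Nat) : Nat × Int :=
  if PySem.List.pyGetD ys (r : Int) 0 = 0 then
    (r + 1, st.2 + f (PySem.List.slice ys (some (st.1 : Int)) (some (r : Int))))
  else st

-- A with a fuel guard for totality only (fuel = length + 1 always suffices,
-- proved below); each clause mirrors A's code step for step.
def answerF : Nat → List Int → Int
  | 0, _ => 0
  | fuel + 1, xs =>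
    if xs.length = 0 ∨ xs.length = 1 then 0
    else if xs.length = 2 then
      ((PySem.List.min? xs (fun y => y)).getD 0) * ((xs.length : Int) - 1)
    else
      let m := (PySem.List.min? xs (fun y => y)).getD 0
      let ys := xs.map (fun x => x - m)
      let st := (List.range xs.length).foldl (answerBody (answerF fuel) ys)
                  (0, m * ((xs.length : Int) - 1))
      st.2 + answerF fuel (PySem.List.slice ys (some (st.1 : Int)) none)

def answer (letters_list : List Int) : Int := answerF (letters_list.length + 1) letters_list

-- ===== PORT B =====
def answer_alt (letters_list : List Int) : Int :=
  (letters_list.zip (PySem.List.slice letters_list (some 1) none)).foldl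
    (fun total p => total + min p.1 p.2) 0

-- ===== PRECONDITION & SPEC =====
def Spec_answer (letters_list : List Int) (out : Int) : Prop := out = answer_alt letters_list
instance (letters_list : List Int) (out : Int) : Decidable (Spec_answer letters_list out) := by unfold Spec_answer; infer_instance

-- ===== CLAIM (what is proved, stated in full; the proofs are below) =====
def Claim_equal_answer : Prop := ∀ (letters_list : List Int), Dom_answer letters_list → Spec_answer letters_list (answer letters_list)

-- ===== LEMMAS AND PROOFS =====

-- sum of adjacent-pair minima, in structural form (proof-side view of B)
def sumAdj : List Int → Int
  | a :: b :: t => min a b + sumAdj (b :: t)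
  | _ => 0

theorem answer_alt_eq_sumAdj (xs : List Int) : answer_alt xs = sumAdj xs := by
  unfold answer_alt
  rw [PySem.List.slice_from_one, PySem.List.foldl_add (g := fun p : Int × Int => min p.1 p.2)]
  induction xs with
  | nil => simp [sumAdj]
  | cons a ys ih =>
    cases ys with
    | nil => simp [sumAdj]
    | cons b t =>
      simp only [List.tail_cons, List.zip_cons_cons, List.map_cons, List.sum_cons] at *
      rw [sumAdj]
      omega

theorem sumAdj_map_sub (m : Int) (xs : List Int) (h : xs ≠ []) :
    sumAdj (xs.map (fun x => x - m)) = sumAdj xs - m * ((xs.length : Int) - 1) := by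
  induction xs with
  | nil => simp at h
  | cons a ys ih =>
    cases ys with
    | nil => simp [sumAdj]
    | cons b t =>
      have ih' := ih (by simp)
      simp only [List.map_cons] at *
      rw [sumAdj, sumAdj, Int.sub_min_sub_right a b m, ih']
      simp only [List.length_cons]
      push_cast
      ring

theorem sumAdj_append_zero (u v : List Int) (hu : ∀ x ∈ u, 0 ≤ x) (hv : ∀ x ∈ v, 0 ≤ x) :
    sumAdj (u ++ (0 : Int) :: v) = sumAdj u + sumAdj v := by
  induction u with
  | nil =>
    cases v with
    | nil => simp [sumAdj]
    | cons c t =>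
      simp only [List.nil_append, sumAdj]
      have : min (0 : Int) c = 0 := by
        have := hv c (by simp)
        omega
      omega
  | cons a u' ih =>
    have ih' := ih (fun x hx => hu x (by simp [hx]))
    cases u' with
    | nil =>
      simp only [List.cons_append, List.nil_append, sumAdj] at *
      have : min a (0 : Int) = 0 := by
        have := hu a (by simp)
        omega
      omega
    | cons b t =>
      simp only [List.cons_append] at *
      rw [sumAdj, sumAdj, ih']
      omega

-- A's loop, in structural form: walk the remaining list carrying the current
-- segment; at a zero, add f of the segment; at the end, add f of the tail segment.
def walk (f : List Int → Int) : List Int → List Int → Int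
  | seg, [] => f seg
  | seg, z :: zs => if z = 0 then f seg + walk f [] zs else walk f (seg ++ [z]) zs

-- The fold-over-indices loop of port A equals walk.
theorem loop_eq_walk (f : List Int → Int) (zs : List Int) :
    ∀ (done seg : List Int) (res : Int),
    (let st := (List.range' (done.length + seg.length) zs.length).foldl
                  (answerBody f (done ++ seg ++ zs)) (done.length, res)
     st.2 + f (PySem.List.slice (done ++ seg ++ zs) (some (st.1 : Int)) none)) =
    res + walk f seg zs := by
  induction zs with
  | nil =>
    intro done seg res
    simp only [List.length_nil, List.range'_zero, List.foldl_nil, List.append_nil, walk]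
    rw [PySem.List.slice_from_natCast, List.drop_left]
  | cons z zs' ih =>
    intro done seg res
    simp only [List.length_cons, List.range'_succ, List.foldl_cons]
    have hget : PySem.List.pyGetD (done ++ seg ++ (z :: zs')) ((done.length + seg.length : Nat) : Int) 0 = z := by
      have h2 : done.length + seg.length = (done ++ seg).length := (List.length_append).symm
      rw [h2, PySem.List.pyGetD_natCast, List.getD_eq_getElem?_getD,
        List.getElem?_append_right (Nat.le_refl _)]
      simp
    by_cases hz : z = 0
    · -- zero found: close the current segment
      have hslice : PySem.List.slice (done ++ seg ++ (z :: zs')) (some ((done.length : Nat) : Int))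
            (some ((done.length + seg.length : Nat) : Int)) = seg := by
        rw [PySem.List.slice_natCast]
        have h1 : done ++ seg ++ (z :: zs') = done ++ (seg ++ z :: zs') := by simp
        rw [h1, List.drop_left]
        have h2 : seg.length = (done.length + seg.length) - done.length := by omega
        rw [← h2, List.take_left]
      rw [answerBody, hget, if_pos hz, hslice, walk, if_pos hz]
      have h3 := ih (done ++ seg ++ [z]) [] (res + f seg)
      rw [hz] at h3
      simp only [List.append_assoc, List.singleton_append, List.length_nil,
        List.length_append, List.length_cons, Nat.add_assoc, hz] at h3 ⊢
      rw [h3]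
      ring
    · -- not a zero: extend the current segment
      rw [answerBody, hget, if_neg hz, walk, if_neg hz]
      have h3 := ih done (seg ++ [z]) res
      simp only [List.append_assoc, List.singleton_append, List.length_nil,
        List.length_append, List.length_cons, Nat.add_assoc] at h3 ⊢
      rw [h3]

-- walk with a correct-on-small-lists f computes sumAdj of the whole list,
-- provided everything is nonnegative and a zero guarantees segments stay short.
theorem walk_eq_sumAdj (N : Nat) (f : List Int → Int)
    (hf : ∀ u : List Int, u.length < N → f u = sumAdj u) :
    ∀ (zs seg : List Int), (∀ x ∈ seg, 0 ≤ x) → (∀ x ∈ zs, 0 ≤ x) →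
    (seg.length + zs.length < N ∨ ((0 : Int) ∈ zs ∧ seg.length + zs.length ≤ N)) →
    walk f seg zs = sumAdj (seg ++ zs) := by
  intro zs
  induction zs with
  | nil =>
    intro seg hseg _ hb
    have hlt : seg.length < N := by
      rcases hb with h | ⟨h0, _⟩
      · simpa using h
      · simp at h0
    rw [walk, hf seg hlt]
    simp
  | cons z zs' ih =>
    intro seg hseg hzs hb
    have hz0 : 0 ≤ z := hzs z (by simp)
    have hzs' : ∀ x ∈ zs', 0 ≤ x := fun x hx => hzs x (by simp [hx])
    by_cases hz : z = 0
    · rw [walk, if_pos hz]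
      have hseglt : seg.length < N := by
        rcases hb with h | ⟨_, h⟩ <;> simp at h <;> omega
      have hrest : walk f [] zs' = sumAdj ([] ++ zs') := by
        apply ih [] (by simp) hzs'
        left
        rcases hb with h | ⟨_, h⟩ <;> simp at h ⊢ <;> omega
      rw [hf seg hseglt, hrest]
      simp only [List.nil_append]
      rw [hz, sumAdj_append_zero seg zs' hseg hzs']
    · rw [walk, if_neg hz]
      have hseg' : ∀ x ∈ seg ++ [z], 0 ≤ x := by
        intro x hx
        rcases List.mem_append.mp hx with h | h
        · exact hseg x h
        · simp at h; omega
      have hrec := ih (seg ++ [z]) hseg' hzs' (by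
        rcases hb with h | ⟨h0, h⟩
        · left; simp at h ⊢; omega
        · right
          refine ⟨?_, by simp at h ⊢; omega⟩
          rcases List.mem_cons.mp h0 with h' | h'
          · exact absurd h'.symm hz
          · exact h')
      rw [hrec]
      simp

-- every call of answerF with fuel above the length computes sumAdj
theorem answerF_eq_sumAdj : ∀ (fuel : Nat) (xs : List Int), xs.length < fuel →
    answerF fuel xs = sumAdj xs := by
  intro fuel
  induction fuel with
  | zero => intro xs h; omega
  | succ f ih =>
    intro xs hlen
    match xs, hlen with
    | [], _ => simp [answerF, sumAdj]
    | [a], _ => simp [answerF, sumAdj]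
    | [a, b], _ =>
      rw [answerF]
      simp only [List.length_cons, List.length_nil]
      norm_num
      rw [PySem.List.min?_id_cons]
      simp [sumAdj]
    | a :: b :: c :: t, hlen =>
      set xs := a :: b :: c :: t with hxs
      have hn3 : 3 ≤ xs.length := by simp [hxs]
      simp only [answerF]
      rw [if_neg (by omega), if_neg (by omega)]
      -- the minimum of xs
      obtain ⟨m, hm⟩ : ∃ m, PySem.List.min? xs (fun y => y) = some m := by
        rcases Option.eq_none_or_eq_some (PySem.List.min? xs (fun y => y)) with h | ⟨m, h⟩
        · rw [PySem.List.min?_eq_none_iff] at h; simp [hxs] at h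
        · exact ⟨m, h⟩
      have hm_mem : m ∈ xs := PySem.List.min?_mem hm
      have hm_min : ∀ y ∈ xs, m ≤ y := by
        intro y hy
        exact PySem.List.min?_isMin hm y hy
      rw [hm]
      simp only [Option.getD_some]
      set ys := xs.map (fun x => x - m) with hys
      have hys_len : ys.length = xs.length := by simp [hys]
      have hys_nonneg : ∀ x ∈ ys, 0 ≤ x := by
        intro x hx
        rcases List.mem_map.mp hx with ⟨y, hy, rfl⟩
        have := hm_min y hy
        omega
      have h0ys : (0 : Int) ∈ ys := by
        exact List.mem_map.mpr ⟨m, hm_mem, by omega⟩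
      -- the loop equals walk
      have hloop := loop_eq_walk (answerF f) ys [] [] (m * ((xs.length : Int) - 1))
      simp only [List.length_nil, List.nil_append, Nat.add_zero, hys_len] at hloop
      rw [List.range_eq_range']
      rw [hloop]
      -- walk computes sumAdj ys
      rw [walk_eq_sumAdj f (answerF f) ih ys [] (by simp) hys_nonneg
            (Or.inr ⟨h0ys, by simp; omega⟩)]
      simp only [List.nil_append]
      rw [hys, sumAdj_map_sub m xs (by simp [hxs])]
      ring

-- ===== VERDICT (by name: the statement is the Claim_ definition above) =====
theorem answer_spec : Claim_equal_answer := by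
  intro xs _
  unfold Spec_answer answer
  rw [answerF_eq_sumAdj (xs.length + 1) xs (by omega), answer_alt_eq_sumAdj]
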